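-- pv_equiv track=rewrite | github.com/Yoowatney/icote | programmers/mock_test.py | solution
-- ===== SOURCE A (Python) =====
-- DIVIDE_1 = 5
--
-- DIVIDE_2 = 8
--
-- DIVIDE_3 = 10
--
-- def solution(answers):
--     math_1 = [1,2,3,4,5]
--     math_2 = [2,1,2,3,2,4,2,5]
--     math_3 = [3,3,1,1,2,2,4,4,5,5]
--     count_1 = 0
--     count_2 = 0
--     count_3 = 0
--
--     for i in range(len(answers)):
--         if math_1[i % DIVIDE_1] == answers[i]:
--             count_1 += 1
--         if math_2[i % DIVIDE_2] == answers[i]: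
--             count_2 += 1
--         if math_3[i % DIVIDE_3] == answers[i]:
--             count_3 += 1
--     answer = [count_1, count_2, count_3]
--     return [i + 1 for i in range(len(answer)) if answer[i] == max(answer)]
-- ===== SOURCE B (Python) =====
-- def solution(answers):
--     # lcm(5, 8, 10) = 40: the three patterns jointly repeat every 40 positions,
--     # so a histogram of (position mod 40, answer) determines all three scores.
--     LCM = 40
--     hist = {}
--     for i, a in enumerate(answers):
--         key = (i % LCM, a)
--         hist[key] = hist.get(key, 0) + 1
--     patterns = [[1, 2, 3, 4, 5],
--                 [2, 1, 2, 3, 2, 4, 2, 5],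
--                 [3, 3, 1, 1, 2, 2, 4, 4, 5, 5]]
--     counts = [sum(hist.get((r, pat[r % len(pat)]), 0) for r in range(LCM))
--               for pat in patterns]
--     best = max(counts)
--     return [i + 1 for i, c in enumerate(counts) if c == best]
-- ===== Notes on version B (the rewrite author's own statement) =====
-- stated objective: alternative
-- what changed: Instead of comparing each answer against all three cyclic patterns, B first builds a histogram dict keyed by (index mod 40, answer) -- 40 = lcm of the pattern lengths -- in a single pattern-free pass, then computes each score by 40 dictionary lookups joining the histogram with that pattern; the argmax tail uses enumerate over the counts.
import Mathlib
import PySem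

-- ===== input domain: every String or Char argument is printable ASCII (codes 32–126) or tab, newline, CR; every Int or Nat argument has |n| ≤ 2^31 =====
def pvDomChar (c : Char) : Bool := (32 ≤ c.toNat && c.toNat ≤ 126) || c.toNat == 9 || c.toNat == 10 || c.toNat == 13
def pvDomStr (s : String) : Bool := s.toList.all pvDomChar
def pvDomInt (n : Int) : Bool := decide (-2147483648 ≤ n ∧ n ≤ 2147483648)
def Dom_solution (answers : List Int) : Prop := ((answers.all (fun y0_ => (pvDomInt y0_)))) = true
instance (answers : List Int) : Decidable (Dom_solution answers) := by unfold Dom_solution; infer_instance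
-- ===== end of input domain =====

-- B replaces A's per-index comparison against the three cyclic patterns by a two-phase
-- algorithm: a histogram dict keyed by (index mod 40, answer) built in one pattern-free
-- pass (40 = lcm of the pattern lengths), then each score obtained by 40 dictionary
-- lookups joining the histogram with that pattern; objective: alternative.

-- ===== PORT A =====
def solution (answers : List Int) : List Int :=
  let math1 : List Int := [1, 2, 3, 4, 5]
  let math2 : List Int := [2, 1, 2, 3, 2, 4, 2, 5]
  let math3 : List Int := [3, 3, 1, 1, 2, 2, 4, 4, 5, 5]
  -- for i in range(len(answers)): three counters updated in one pass
  let s := (PySem.List.pyRange 0 answers.length 1).foldl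
    (fun (c : Int × Int × Int) i =>
      let a := PySem.List.pyGetD answers i 0
      ((if PySem.List.pyGetD math1 (PySem.Int.mod i 5) 0 = a then c.1 + 1 else c.1),
       (if PySem.List.pyGetD math2 (PySem.Int.mod i 8) 0 = a then c.2.1 + 1 else c.2.1),
       (if PySem.List.pyGetD math3 (PySem.Int.mod i 10) 0 = a then c.2.2 + 1 else c.2.2)))
    ((0 : Int), (0 : Int), (0 : Int))
  let answer : List Int := [s.1, s.2.1, s.2.2]
  let m := (PySem.List.max? answer (fun x => x)).getD 0
  -- [i + 1 for i in range(len(answer)) if answer[i] == max(answer)]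
  (PySem.List.pyRange 0 answer.length 1).foldl
    (fun acc i => if PySem.List.pyGetD answer i 0 = m then acc ++ [i + 1] else acc) []

-- ===== PORT B =====
def solution_alt (answers : List Int) : List Int :=
  -- hist[(i % 40, a)] += 1 over enumerate(answers)
  let hist := (PySem.List.enumerate answers).foldl
    (fun (d : PySem.Dict (Int × Int) Int) p =>
      d.insert (PySem.Int.mod p.1 40, p.2) (d.getD (PySem.Int.mod p.1 40, p.2) 0 + 1))
    PySem.Dict.empty
  let patterns : List (List Int) :=
    [[1, 2, 3, 4, 5], [2, 1, 2, 3, 2, 4, 2, 5], [3, 3, 1, 1, 2, 2, 4, 4, 5, 5]]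
  -- counts = [sum(hist.get((r, pat[r % len(pat)]), 0) for r in range(40)) for pat in patterns]
  let counts := patterns.map (fun pat =>
    ((PySem.List.pyRange 0 40 1).map (fun r =>
      hist.getD (r, PySem.List.pyGetD pat (PySem.Int.mod r (pat.length : Int)) 0) 0)).sum)
  let best := (PySem.List.max? counts (fun x => x)).getD 0
  (PySem.List.enumerate counts).filterMap
    (fun p => if p.2 = best then some (p.1 + 1) else none)

-- ===== PRECONDITION & SPEC =====
def Spec_solution (answers : List Int) (out : List Int) : Prop := out = solution_alt answers
instance (answers : List Int) (out : List Int) : Decidable (Spec_solution answers out) := by unfold Spec_solution; infer_instance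

-- ===== CLAIM =====
def Claim_equal_solution : Prop := ∀ (answers : List Int), Dom_solution answers → Spec_solution answers (solution answers)

-- ===== LEMMAS AND PROOFS =====

-- A per-pattern count: the common form both computations reduce to.
def patCount (pat : List Int) (answers : List Int) : Int :=
  ((PySem.List.pyRange 0 answers.length 1).countP
    (fun i => PySem.List.pyGetD pat (PySem.Int.mod i (pat.length : Int)) 0
              = PySem.List.pyGetD answers i 0) : Int)

-- A's interleaved fold is the triple of patCounts
theorem a_fold_eq (answers : List Int) :
    (PySem.List.pyRange 0 answers.length 1).foldl
      (fun (c : Int × Int × Int) i =>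
        let a := PySem.List.pyGetD answers i 0
        ((if PySem.List.pyGetD [1, 2, 3, 4, 5] (PySem.Int.mod i 5) 0 = a then c.1 + 1 else c.1),
         (if PySem.List.pyGetD [2, 1, 2, 3, 2, 4, 2, 5] (PySem.Int.mod i 8) 0 = a then c.2.1 + 1 else c.2.1),
         (if PySem.List.pyGetD [3, 3, 1, 1, 2, 2, 4, 4, 5, 5] (PySem.Int.mod i 10) 0 = a then c.2.2 + 1 else c.2.2)))
      ((0 : Int), (0 : Int), (0 : Int))
    = (patCount [1, 2, 3, 4, 5] answers,
       patCount [2, 1, 2, 3, 2, 4, 2, 5] answers,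
       patCount [3, 3, 1, 1, 2, 2, 4, 4, 5, 5] answers) := by
  rw [PySem.List.foldl_prod_mk
        (f := fun acc i => if PySem.List.pyGetD [1, 2, 3, 4, 5] (PySem.Int.mod i 5) 0
                              = PySem.List.pyGetD answers i 0 then acc + 1 else acc)
        (g := fun (c : Int × Int) i =>
          ((if PySem.List.pyGetD [2, 1, 2, 3, 2, 4, 2, 5] (PySem.Int.mod i 8) 0
               = PySem.List.pyGetD answers i 0 then c.1 + 1 else c.1),
           (if PySem.List.pyGetD [3, 3, 1, 1, 2, 2, 4, 4, 5, 5] (PySem.Int.mod i 10) 0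
               = PySem.List.pyGetD answers i 0 then c.2 + 1 else c.2))),
      PySem.List.foldl_prod_mk
        (f := fun acc i => if PySem.List.pyGetD [2, 1, 2, 3, 2, 4, 2, 5] (PySem.Int.mod i 8) 0
                              = PySem.List.pyGetD answers i 0 then acc + 1 else acc)
        (g := fun acc i => if PySem.List.pyGetD [3, 3, 1, 1, 2, 2, 4, 4, 5, 5] (PySem.Int.mod i 10) 0
                              = PySem.List.pyGetD answers i 0 then acc + 1 else acc)]
  simp [PySem.List.foldl_ite_add_one, patCount]

-- summing an indicator hitting at most one element of a Nodup list
theorem sum_ite_key (l : List Int) (hnd : l.Nodup) (c : Int) (q : Int → Prop) [DecidablePred q] :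
    (l.map (fun r => if r = c ∧ q r then (1 : Int) else 0)).sum
    = if c ∈ l ∧ q c then 1 else 0 := by
  induction l with
  | nil => simp
  | cons h t ih =>
    simp only [List.map_cons, List.sum_cons, List.mem_cons, List.nodup_cons] at *
    rcases hnd with ⟨hnm, hnd⟩
    rw [ih hnd]
    by_cases hc : h = c
    · subst hc
      by_cases hq : q h <;> simp [hq, hnm]
    · have hch : ¬c = h := fun e => hc e.symm
      have hng : ¬(h = c ∧ q h) := fun e => hc e.1
      simp [hng, hch]

-- the histogram sum over residues counts exactly the matching pairs
theorem hist_sum (E : List (Int × Int)) (g : Int → Int) :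
    ((PySem.List.pyRange 0 40 1).map (fun r =>
        (((E.map (fun p => (PySem.Int.mod p.1 40, p.2))).count (r, g r) : Nat) : Int))).sum
    = (E.countP (fun p => g (PySem.Int.mod p.1 40) == p.2) : Int) := by
  induction E with
  | nil => simp
  | cons p t ih =>
    have hmem : PySem.Int.mod p.1 40 ∈ PySem.List.pyRange 0 40 1 := by
      rw [PySem.List.mem_pyRange_one, PySem.Int.mod_eq_emod_of_pos (by norm_num)]
      exact ⟨Int.emod_nonneg _ (by norm_num), Int.emod_lt_of_pos _ (by norm_num)⟩
    have hstep : ∀ r : Int,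
        (((((p :: t).map (fun p => (PySem.Int.mod p.1 40, p.2))).count (r, g r) : Nat) : Int))
        = ((t.map (fun p => (PySem.Int.mod p.1 40, p.2))).count (r, g r) : Int)
          + (if r = PySem.Int.mod p.1 40 ∧ g r = p.2 then (1 : Int) else 0) := by
      intro r
      have hiff : (PySem.Int.mod p.1 40 = r ∧ p.2 = g r) ↔ (r = PySem.Int.mod p.1 40 ∧ g r = p.2) :=
        ⟨fun h => ⟨h.1.symm, h.2.symm⟩, fun h => ⟨h.1.symm, h.2.symm⟩⟩
      simp only [List.map_cons, List.count_cons]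
      push_cast
      congr 1
      simp only [beq_iff_eq, Prod.mk.injEq, hiff]
    simp only [hstep]
    rw [PySem.List.sum_map_add_int, ih,
        sum_ite_key _ (PySem.List.nodup_pyRange_one 0 40) _ (fun r => g r = p.2)]
    rw [List.countP_cons]
    have hb1 : (0 : Int) ≤ p.1 % 40 := Int.emod_nonneg _ (by norm_num)
    have hb2 : p.1 % 40 < 40 := Int.emod_lt_of_pos _ (by norm_num)
    by_cases hg : g (p.1 % 40) = p.2 <;>
      simp [hg, hb1, hb2]

-- B's per-pattern residue sum equals patCount (pattern length divides 40)
theorem b_count_eq (pat : List Int) (answers : List Int)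
    (hpos : 0 < (pat.length : Int)) (hdvd : (pat.length : Int) ∣ 40) :
    ((PySem.List.pyRange 0 40 1).map (fun r =>
      ((PySem.List.enumerate answers).foldl
        (fun (d : PySem.Dict (Int × Int) Int) p =>
          d.insert (PySem.Int.mod p.1 40, p.2) (d.getD (PySem.Int.mod p.1 40, p.2) 0 + 1))
        PySem.Dict.empty).getD
          (r, PySem.List.pyGetD pat (PySem.Int.mod r (pat.length : Int)) 0) 0)).sum
    = patCount pat answers := by
  have hfold : ∀ (r : Int) (v : Int),
      ((PySem.List.enumerate answers).foldl
        (fun (d : PySem.Dict (Int × Int) Int) p =>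
          d.insert (PySem.Int.mod p.1 40, p.2) (d.getD (PySem.Int.mod p.1 40, p.2) 0 + 1))
        PySem.Dict.empty).getD (r, v) 0
      = (((PySem.List.enumerate answers).map (fun p => (PySem.Int.mod p.1 40, p.2))).count (r, v) : Int) := by
    intro r v
    rw [show (PySem.List.enumerate answers).foldl
          (fun (d : PySem.Dict (Int × Int) Int) p =>
            d.insert (PySem.Int.mod p.1 40, p.2) (d.getD (PySem.Int.mod p.1 40, p.2) 0 + 1))
          PySem.Dict.empty
        = ((PySem.List.enumerate answers).map (fun p : Int × Int => (PySem.Int.mod p.1 40, p.2))).foldl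
            (fun (d : PySem.Dict (Int × Int) Int) k => d.insert k (d.getD k 0 + 1))
            PySem.Dict.empty from by rw [List.foldl_map],
        PySem.Dict.getD_foldl_insert_add_one, PySem.Dict.getD_empty]
    ring
  simp only [hfold]
  rw [hist_sum (PySem.List.enumerate answers)
        (fun r => PySem.List.pyGetD pat (PySem.Int.mod r (pat.length : Int)) 0)]
  have hmm : ∀ i : Int, PySem.Int.mod (PySem.Int.mod i 40) (pat.length : Int)
      = PySem.Int.mod i (pat.length : Int) := by
    intro i
    rw [PySem.Int.mod_eq_emod_of_pos hpos, PySem.Int.mod_eq_emod_of_pos hpos,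
        PySem.Int.mod_eq_emod_of_pos (by norm_num : (0:Int) < 40)]
    exact Int.emod_emod_of_dvd _ hdvd
  rw [PySem.List.enumerate_eq_map_pyRange (d := 0), List.countP_map]
  unfold patCount
  congr 1
  apply List.countP_congr
  intro i _
  simp only [Function.comp_def, hmm i]
  simp [beq_iff_eq]

-- the shared argmax tail on a symbolic 3-element count list
set_option maxRecDepth 10000 in
theorem tail_eq (x y z : Int) :
    (PySem.List.pyRange 0 ([x, y, z] : List Int).length 1).foldl
      (fun acc i => if PySem.List.pyGetD [x, y, z] i 0
          = (PySem.List.max? [x, y, z] (fun v => v)).getD 0 then acc ++ [i + 1] else acc) []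
    = (PySem.List.enumerate [x, y, z]).filterMap
        (fun p => if p.2 = (PySem.List.max? [x, y, z] (fun v => v)).getD 0
                  then some (p.1 + 1) else none) := by
  have hr : PySem.List.pyRange 0 ((3 : Nat) : Int) 1 = [0, 1, 2] := by decide
  simp only [List.length_cons, List.length_nil, Nat.reduceAdd, hr]
  simp only [PySem.List.enumerate_cons, PySem.List.enumerate_nil,
    List.filterMap_cons, List.filterMap_nil, List.foldl,
    show PySem.List.pyGetD [x, y, z] 0 0 = x from rfl,
    show PySem.List.pyGetD [x, y, z] 1 0 = y from rfl,
    show PySem.List.pyGetD [x, y, z] 2 0 = z from rfl]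
  norm_num
  split_ifs <;> rfl

-- ===== VERDICT =====
theorem solution_spec : Claim_equal_solution := by
  intro answers _
  show solution answers = solution_alt answers
  unfold solution solution_alt
  simp only [a_fold_eq, List.map_cons, List.map_nil,
    b_count_eq [1, 2, 3, 4, 5] answers (by norm_num) (by norm_num),
    b_count_eq [2, 1, 2, 3, 2, 4, 2, 5] answers (by norm_num) (by norm_num),
    b_count_eq [3, 3, 1, 1, 2, 2, 4, 4, 5, 5] answers (by norm_num) (by norm_num)]
  exact tail_eq _ _ _
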